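-- pv_equiv track=rewrite | github.com/jaspervrugt/MODELAVG | Python/miscellaneous/MODELAVG_functions.py | create_str_plot
-- ===== SOURCE A (Python) =====
-- def create_str_plot(method, options, K):
--     """
--     Generates strings for output tables and postprocessor figures.
--
--     Parameters:
--     method (str): The method to generate the plot and table strings for.
--     options (dict): A dictionary containing 'VAR', 'PDF', and 'TAU' options.
--     K (int): The number of elements for the beta parameters.
--
--     Returns:
--     str_table (list): The list for the table output (non-LaTeX).
--     str_plot (list): The list for the plot output (LaTeX formatted).
--     """
--     # First print only the beta values
--     str_ = [f'beta_{{{i}}}' for i in range(1, K+1)]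
--
--     # Now for BMA method expand the vector
--     if method == 'bma':
--         if options['VAR'] == '1':
--             str_.append('sigma')
--         elif options['VAR'] == '2':
--             str_.extend([f'sigma_{{{i}}}' for i in range(1, K+1)])
--         elif options['VAR'] == '3':
--             str_.append('c')
--         elif options['VAR'] == '4':
--             str_.extend([f'c_{{{i}}}' for i in range(1, K+1)])
--
--         # Additional parameters based on PDF and TAU options
--         if options['PDF'] in ['gen_normal', 'gev', 'gpareto']:
--             if options['PDF'] == 'gen_normal':
--                 if options['TAU'] == '1':
--                     str_.append('tau')
--                 elif options['TAU'] == '2':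
--                     str_.extend([f'tau_{{{i}}}' for i in range(1, K+1)])
--
--             elif options['PDF'] == 'gev':
--                 if options['TAU'] == '1':
--                     str_.append('xi')
--                 elif options['TAU'] == '2':
--                     str_.extend([f'xi_{{{i}}}' for i in range(1, K+1)])
--
--             elif options['PDF'] == 'gpareto':
--                 if options['TAU'] == '1':
--                     str_.append('k')
--                 elif options['TAU'] == '2':
--                     str_.extend([f'k_{{{i}}}' for i in range(1, K+1)])
--
--     # Table does not need LaTeX print, so return as it is
--     str_table = str_
--
--     # LaTeX formatting for plotting
--     str_plot = [s.replace('beta', '\\beta')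
--                 .replace('sigma', '\\sigma')
--                 .replace('tau', '\\tau')
--                 .replace('xi', '\\xi') for s in str_]
--
--     # Enclose each string in LaTeX math mode '$...$'
--     str_plot = [f'${item}$' for item in str_plot]
--
--     return str_table, str_plot
-- ===== SOURCE B (Python) =====
-- # Unified construction: one lookup table per option and a single helper that
-- # emits both the table name and its LaTeX form directly, instead of A's four
-- # if/elif chains followed by a chained str.replace pass.
--
-- _VAR_MAP = {'1': ('sigma', False), '2': ('sigma', True),
--             '3': ('c', False), '4': ('c', True)}
-- _PDF_MAP = {'gen_normal': 'tau', 'gev': 'xi', 'gpareto': 'k'}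
-- _LATEX = {'beta': '\\beta', 'sigma': '\\sigma', 'tau': '\\tau', 'xi': '\\xi'}
--
--
-- def create_str_plot(method, options, K):
--     str_table, str_plot = [], []
--
--     def add(sym, expand):
--         tex = _LATEX.get(sym, sym)
--         if expand:
--             str_table.extend(f'{sym}_{{{i}}}' for i in range(1, K + 1))
--             str_plot.extend(f'${tex}_{{{i}}}$' for i in range(1, K + 1))
--         else:
--             str_table.append(sym)
--             str_plot.append(f'${tex}$')
--
--     add('beta', True)
--     if method == 'bma':
--         v = _VAR_MAP.get(options['VAR'])
--         if v is not None:
--             add(*v)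
--         sym = _PDF_MAP.get(options['PDF'])
--         if sym is not None:
--             tau = options['TAU']
--             if tau in ('1', '2'):
--                 add(sym, tau == '2')
--     return str_table, str_plot
-- ===== Notes on version B (the rewrite author's own statement) =====
-- stated objective: simpler
-- what changed: Replaces A's four-way if/elif chains plus a post-hoc chained str.replace LaTeX pass by two lookup tables (VAR/PDF) and one shared helper that emits the table entry and its LaTeX '$...$' form directly in a single construction.
import Mathlib
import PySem

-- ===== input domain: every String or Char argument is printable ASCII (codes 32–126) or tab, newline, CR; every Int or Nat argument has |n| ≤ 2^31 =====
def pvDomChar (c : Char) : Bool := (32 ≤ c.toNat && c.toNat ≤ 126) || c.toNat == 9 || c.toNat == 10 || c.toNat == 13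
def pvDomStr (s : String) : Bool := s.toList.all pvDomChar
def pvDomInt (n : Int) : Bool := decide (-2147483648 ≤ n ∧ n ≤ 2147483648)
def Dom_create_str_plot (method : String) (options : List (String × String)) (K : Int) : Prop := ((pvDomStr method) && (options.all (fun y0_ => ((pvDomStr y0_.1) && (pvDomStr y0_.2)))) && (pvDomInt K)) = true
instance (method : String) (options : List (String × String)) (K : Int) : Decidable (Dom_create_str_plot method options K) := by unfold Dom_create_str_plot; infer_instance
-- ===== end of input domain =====

-- B replaces A's four if/elif chains plus a post-hoc chained str.replace LaTeX pass by
-- lookup tables and one shared helper emitting table and '$...$' plot entries directly (objective: simpler).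

-- ===== PORT A =====
def create_str_plot (method : String) (options : List (String × String)) (K : Int) : List String × List String :=
  let d : PySem.Dict String String := PySem.Dict.mk options
  let str0 : List String := (PySem.List.pyRange 1 (K+1)).map
    (fun i => String.ofList ("beta_{".toList ++ PySem.Int.toChars i ++ "}".toList))
  let str1 : List String :=
    if method = "bma" then
      -- d.get? "VAR" = none means Python raises KeyError here: such inputs are excluded by Pre_
      let s1 :=
        if d.get? "VAR" = some "1" then str0 ++ ["sigma"]
        else if d.get? "VAR" = some "2" then str0 ++ (PySem.List.pyRange 1 (K+1)).map
          (fun i => String.ofList ("sigma_{".toList ++ PySem.Int.toChars i ++ "}".toList))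
        else if d.get? "VAR" = some "3" then str0 ++ ["c"]
        else if d.get? "VAR" = some "4" then str0 ++ (PySem.List.pyRange 1 (K+1)).map
          (fun i => String.ofList ("c_{".toList ++ PySem.Int.toChars i ++ "}".toList))
        else str0
      -- d.get? "PDF"/"TAU" = none likewise raise KeyError in Python: excluded by Pre_
      if d.get? "PDF" = some "gen_normal" ∨ d.get? "PDF" = some "gev" ∨ d.get? "PDF" = some "gpareto" then
        if d.get? "PDF" = some "gen_normal" then
          if d.get? "TAU" = some "1" then s1 ++ ["tau"]
          else if d.get? "TAU" = some "2" then s1 ++ (PySem.List.pyRange 1 (K+1)).map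
            (fun i => String.ofList ("tau_{".toList ++ PySem.Int.toChars i ++ "}".toList))
          else s1
        else if d.get? "PDF" = some "gev" then
          if d.get? "TAU" = some "1" then s1 ++ ["xi"]
          else if d.get? "TAU" = some "2" then s1 ++ (PySem.List.pyRange 1 (K+1)).map
            (fun i => String.ofList ("xi_{".toList ++ PySem.Int.toChars i ++ "}".toList))
          else s1
        else
          if d.get? "TAU" = some "1" then s1 ++ ["k"]
          else if d.get? "TAU" = some "2" then s1 ++ (PySem.List.pyRange 1 (K+1)).map
            (fun i => String.ofList ("k_{".toList ++ PySem.Int.toChars i ++ "}".toList))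
          else s1
      else s1
    else str0
  let plot1 := str1.map (fun s =>
    PySem.Str.replace (PySem.Str.replace (PySem.Str.replace (PySem.Str.replace s "beta" "\\beta")
      "sigma" "\\sigma") "tau" "\\tau") "xi" "\\xi")
  let plot2 := plot1.map (fun item => String.ofList ('$' :: item.toList ++ ['$']))
  (str1, plot2)

-- ===== PORT B =====
def bLatex : PySem.Dict String String :=
  PySem.Dict.mk [("beta", "\\beta"), ("sigma", "\\sigma"), ("tau", "\\tau"), ("xi", "\\xi")]
def bVarMap : PySem.Dict String (String × Bool) :=
  PySem.Dict.mk [("1", ("sigma", false)), ("2", ("sigma", true)), ("3", ("c", false)), ("4", ("c", true))]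
def bPdfMap : PySem.Dict String String :=
  PySem.Dict.mk [("gen_normal", "tau"), ("gev", "xi"), ("gpareto", "k")]

def bAdd (acc : List String × List String) (sym : String) (expand : Bool) (K : Int) :
    List String × List String :=
  let tex := bLatex.getD sym sym
  if expand then
    (acc.1 ++ (PySem.List.pyRange 1 (K+1)).map
       (fun i => String.ofList (sym.toList ++ "_{".toList ++ PySem.Int.toChars i ++ "}".toList)),
     acc.2 ++ (PySem.List.pyRange 1 (K+1)).map
       (fun i => String.ofList ('$' :: (tex.toList ++ "_{".toList ++ PySem.Int.toChars i ++ "}".toList) ++ ['$'])))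
  else
    (acc.1 ++ [sym], acc.2 ++ [String.ofList ('$' :: tex.toList ++ ['$'])])

def create_str_plot_alt (method : String) (options : List (String × String)) (K : Int) :
    List String × List String :=
  let d : PySem.Dict String String := PySem.Dict.mk options
  let acc := bAdd ([], []) "beta" true K
  if method = "bma" then
    -- a missing 'VAR'/'PDF'/'TAU' key raises KeyError in Python: excluded by Pre_
    let acc1 :=
      match d.get? "VAR" with
      | none => acc
      | some v =>
        match bVarMap.get? v with
        | none => acc
        | some (sym, ex) => bAdd acc sym ex K
    match d.get? "PDF" with
    | none => acc1
    | some p =>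
      match bPdfMap.get? p with
      | none => acc1
      | some sym =>
        match d.get? "TAU" with
        | none => acc1
        | some tau => if tau = "1" ∨ tau = "2" then bAdd acc1 sym (tau = "2") K else acc1
  else acc

-- ===== PRECONDITION & SPEC =====
-- Pre_ excludes exactly the inputs where Python raises KeyError: method 'bma' with a missing
-- 'VAR' or 'PDF' key, or a PDF in {gen_normal, gev, gpareto} with a missing 'TAU' key.
def Pre_create_str_plot (method : String) (options : List (String × String)) (K : Int) : Prop :=
  method = "bma" →
    (PySem.Dict.mk options).contains "VAR" = true ∧
    (PySem.Dict.mk options).contains "PDF" = true ∧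
    (((PySem.Dict.mk options).get? "PDF" = some "gen_normal" ∨
      (PySem.Dict.mk options).get? "PDF" = some "gev" ∨
      (PySem.Dict.mk options).get? "PDF" = some "gpareto") →
      (PySem.Dict.mk options).contains "TAU" = true)
instance (method : String) (options : List (String × String)) (K : Int) :
    Decidable (Pre_create_str_plot method options K) := by unfold Pre_create_str_plot; infer_instance

def pvWitness_create_str_plot : String × (List (String × String)) × Int :=
  ("bma", [("VAR", "1"), ("PDF", "gev"), ("TAU", "2")], 2)

def Spec_create_str_plot (method : String) (options : List (String × String)) (K : Int)
    (out : List String × List String) : Prop := out = create_str_plot_alt method options K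
instance (method : String) (options : List (String × String)) (K : Int)
    (out : List String × List String) : Decidable (Spec_create_str_plot method options K out) := by
  unfold Spec_create_str_plot; infer_instance

-- ===== CLAIM (what is proved, stated in full; the proofs are below) =====
def Claim_equal_create_str_plot : Prop := ∀ (method : String) (options : List (String × String)) (K : Int), Dom_create_str_plot method options K → Pre_create_str_plot method options K → Spec_create_str_plot method options K (create_str_plot method options K)

-- ===== LEMMAS AND PROOFS =====

-- A's chained replace pass, on the char-list side
def chainL (l : List Char) : List Char :=
  PySem.Chars.replace (PySem.Chars.replace (PySem.Chars.replace (PySem.Chars.replace l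
    "beta".toList "\\beta".toList) "sigma".toList "\\sigma".toList) "tau".toList "\\tau".toList)
    "xi".toList "\\xi".toList

-- wrap ∘ chain, what A applies to each table entry to get the plot entry
def wca (s : String) : String := String.ofList ('$' :: chainL s.toList ++ ['$'])

lemma go_no_occ (old new : List Char) :
    ∀ (fuel : Nat) (l acc : List Char), l.length ≤ fuel → ¬ old <:+: l →
      PySem.Chars.replace.go old new fuel l acc = acc.reverse ++ l := by
  intro fuel
  induction fuel with
  | zero =>
    intro l acc hl _
    have : l = [] := List.eq_nil_of_length_eq_zero (Nat.le_zero.1 hl)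
    subst this; simp [PySem.Chars.replace.go]
  | succ f ih =>
    intro l acc hl hocc
    cases l with
    | nil => simp [PySem.Chars.replace.go]
    | cons c t =>
      have hpre : old.isPrefixOf (c :: t) = false := by
        cases h : old.isPrefixOf (c :: t)
        · rfl
        · exact absurd (List.isPrefixOf_iff_prefix.1 h).isInfix hocc
      have ht : ¬ old <:+: t := fun h => hocc (h.trans (List.suffix_cons c t).isInfix)
      simp only [PySem.Chars.replace.go, hpre, Bool.false_eq_true, if_false]
      rw [ih t (c :: acc) (by simpa using Nat.le_of_succ_le_succ (by simpa using hl)) ht]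
      simp

lemma not_infix_of_mem_not_mem {c : Char} {old s : List Char} (hc : c ∈ old) (hs : c ∉ s) :
    ¬ old <:+: s := fun h => hs (h.subset hc)

lemma replace_id (s old new : List Char) (c : Char) (hc : c ∈ old) (hs : c ∉ s) :
    PySem.Chars.replace s old new = s := by
  have hne : old.isEmpty = false := by cases old <;> simp_all
  unfold PySem.Chars.replace
  rw [hne]
  simp only [Bool.false_eq_true, if_false]
  rw [go_no_occ old new s.length s [] (le_refl _) (not_infix_of_mem_not_mem hc hs)]
  simp

lemma replace_front (old new rest : List Char) (c : Char) (hc : c ∈ old) (hrest : c ∉ rest) :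
    PySem.Chars.replace (old ++ rest) old new = new ++ rest := by
  obtain ⟨o, os, rfl⟩ : ∃ o os, old = o :: os := by
    cases old with
    | nil => cases hc
    | cons o os => exact ⟨o, os, rfl⟩
  unfold PySem.Chars.replace
  simp only [List.isEmpty_cons, Bool.false_eq_true, if_false]
  have hlen : ((o :: os) ++ rest).length = (os ++ rest).length + 1 := by simp
  rw [hlen]
  have hpre : (o :: os).isPrefixOf (o :: (os ++ rest)) = true := by
    rw [← List.cons_append]; exact List.isPrefixOf_iff_prefix.2 (List.prefix_append _ _)
  simp only [PySem.Chars.replace.go, List.cons_append, hpre, if_true]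
  rw [show (o :: (os ++ rest)) = (o :: os) ++ rest from rfl, List.drop_left]
  rw [go_no_occ _ _ _ rest _ (by simp) (not_infix_of_mem_not_mem hc hrest)]
  simp

lemma digitChar_isDigit (m : Nat) (h : m < 10) : (Nat.digitChar m).isDigit = true := by
  interval_cases m <;> decide

lemma toDigitsCore_digits :
    ∀ (f n : Nat) (l : List Char), (∀ c ∈ l, c.isDigit = true) →
      ∀ c ∈ Nat.toDigitsCore 10 f n l, c.isDigit = true := by
  intro f
  induction f with
  | zero => intro n l hl; simpa [Nat.toDigitsCore] using hl
  | succ f ih =>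
    intro n l hl c hc
    simp only [Nat.toDigitsCore] at hc
    by_cases h0 : n / 10 = 0
    · rw [if_pos h0] at hc
      rcases List.mem_cons.1 hc with h | h
      · subst h; exact digitChar_isDigit _ (Nat.mod_lt _ (by decide))
      · exact hl c h
    · rw [if_neg h0] at hc
      refine ih (n / 10) _ ?_ c hc
      intro c' hc'
      rcases List.mem_cons.1 hc' with h | h
      · subst h; exact digitChar_isDigit _ (Nat.mod_lt _ (by decide))
      · exact hl c' h

lemma toChars_digits (i : Int) (h : 1 ≤ i) :
    ∀ c ∈ PySem.Int.toChars i, c.isDigit = true := by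
  unfold PySem.Int.toChars
  rw [if_neg (by omega)]
  exact toDigitsCore_digits _ _ [] (by simp)

lemma not_mem_parts3 (c : Char) (l2 l3 d : List Char)
    (hd : ∀ x ∈ d, x.isDigit = true) (hc : c.isDigit = false)
    (h2 : c ∉ l2) (h3 : c ∉ l3) : c ∉ l2 ++ (d ++ l3) := by
  intro h
  simp only [List.mem_append] at h
  rcases h with h | h | h
  · exact h2 h
  · rw [hd c h] at hc; cases hc
  · exact h3 h

lemma not_mem_parts (c : Char) (l1 l2 l3 d : List Char)
    (hd : ∀ x ∈ d, x.isDigit = true) (hc : c.isDigit = false)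
    (h1 : c ∉ l1) (h2 : c ∉ l2) (h3 : c ∉ l3) : c ∉ l1 ++ (l2 ++ (d ++ l3)) := by
  intro h
  simp only [List.mem_append] at h
  rcases h with h | h | h | h
  · exact h1 h
  · exact h2 h
  · rw [hd c h] at hc; cases hc
  · exact h3 h

lemma chain_beta (d : List Char) (hd : ∀ x ∈ d, x.isDigit = true) :
    chainL ("beta".toList ++ ("_{".toList ++ (d ++ "}".toList))) =
      "\\beta".toList ++ ("_{".toList ++ (d ++ "}".toList)) := by
  unfold chainL
  rw [replace_front _ _ _ 'b' (by decide)
    (not_mem_parts3 'b' "_{".toList "}".toList d hd (by decide) (by decide) (by decide))]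
  rw [replace_id _ _ _ 's' (by decide)
    (not_mem_parts 's' "\\beta".toList "_{".toList "}".toList d hd (by decide) (by decide) (by decide) (by decide))]
  rw [replace_id _ _ _ 'u' (by decide)
    (not_mem_parts 'u' "\\beta".toList "_{".toList "}".toList d hd (by decide) (by decide) (by decide) (by decide))]
  rw [replace_id _ _ _ 'x' (by decide)
    (not_mem_parts 'x' "\\beta".toList "_{".toList "}".toList d hd (by decide) (by decide) (by decide) (by decide))]

lemma chain_sigma (d : List Char) (hd : ∀ x ∈ d, x.isDigit = true) :
    chainL ("sigma".toList ++ ("_{".toList ++ (d ++ "}".toList))) =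
      "\\sigma".toList ++ ("_{".toList ++ (d ++ "}".toList)) := by
  unfold chainL
  rw [replace_id _ _ _ 'b' (by decide)
    (not_mem_parts 'b' "sigma".toList "_{".toList "}".toList d hd (by decide) (by decide) (by decide) (by decide))]
  rw [replace_front _ _ _ 's' (by decide)
    (not_mem_parts3 's' "_{".toList "}".toList d hd (by decide) (by decide) (by decide))]
  rw [replace_id _ _ _ 'u' (by decide)
    (not_mem_parts 'u' "\\sigma".toList "_{".toList "}".toList d hd (by decide) (by decide) (by decide) (by decide))]
  rw [replace_id _ _ _ 'x' (by decide)
    (not_mem_parts 'x' "\\sigma".toList "_{".toList "}".toList d hd (by decide) (by decide) (by decide) (by decide))]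

lemma chain_c (d : List Char) (hd : ∀ x ∈ d, x.isDigit = true) :
    chainL ("c".toList ++ ("_{".toList ++ (d ++ "}".toList))) =
      "c".toList ++ ("_{".toList ++ (d ++ "}".toList)) := by
  unfold chainL
  rw [replace_id _ _ _ 'b' (by decide)
    (not_mem_parts 'b' "c".toList "_{".toList "}".toList d hd (by decide) (by decide) (by decide) (by decide))]
  rw [replace_id _ _ _ 's' (by decide)
    (not_mem_parts 's' "c".toList "_{".toList "}".toList d hd (by decide) (by decide) (by decide) (by decide))]
  rw [replace_id _ _ _ 'u' (by decide)
    (not_mem_parts 'u' "c".toList "_{".toList "}".toList d hd (by decide) (by decide) (by decide) (by decide))]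
  rw [replace_id _ _ _ 'x' (by decide)
    (not_mem_parts 'x' "c".toList "_{".toList "}".toList d hd (by decide) (by decide) (by decide) (by decide))]

lemma chain_tau (d : List Char) (hd : ∀ x ∈ d, x.isDigit = true) :
    chainL ("tau".toList ++ ("_{".toList ++ (d ++ "}".toList))) =
      "\\tau".toList ++ ("_{".toList ++ (d ++ "}".toList)) := by
  unfold chainL
  rw [replace_id _ _ _ 'b' (by decide)
    (not_mem_parts 'b' "tau".toList "_{".toList "}".toList d hd (by decide) (by decide) (by decide) (by decide))]
  rw [replace_id _ _ _ 's' (by decide)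
    (not_mem_parts 's' "tau".toList "_{".toList "}".toList d hd (by decide) (by decide) (by decide) (by decide))]
  rw [replace_front _ _ _ 'u' (by decide)
    (not_mem_parts3 'u' "_{".toList "}".toList d hd (by decide) (by decide) (by decide))]
  rw [replace_id _ _ _ 'x' (by decide)
    (not_mem_parts 'x' "\\tau".toList "_{".toList "}".toList d hd (by decide) (by decide) (by decide) (by decide))]

lemma chain_xi (d : List Char) (hd : ∀ x ∈ d, x.isDigit = true) :
    chainL ("xi".toList ++ ("_{".toList ++ (d ++ "}".toList))) =
      "\\xi".toList ++ ("_{".toList ++ (d ++ "}".toList)) := by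
  unfold chainL
  rw [replace_id _ _ _ 'b' (by decide)
    (not_mem_parts 'b' "xi".toList "_{".toList "}".toList d hd (by decide) (by decide) (by decide) (by decide))]
  rw [replace_id _ _ _ 's' (by decide)
    (not_mem_parts 's' "xi".toList "_{".toList "}".toList d hd (by decide) (by decide) (by decide) (by decide))]
  rw [replace_id _ _ _ 'u' (by decide)
    (not_mem_parts 'u' "xi".toList "_{".toList "}".toList d hd (by decide) (by decide) (by decide) (by decide))]
  rw [replace_front _ _ _ 'x' (by decide)
    (not_mem_parts3 'x' "_{".toList "}".toList d hd (by decide) (by decide) (by decide))]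

lemma chain_k (d : List Char) (hd : ∀ x ∈ d, x.isDigit = true) :
    chainL ("k".toList ++ ("_{".toList ++ (d ++ "}".toList))) =
      "k".toList ++ ("_{".toList ++ (d ++ "}".toList)) := by
  unfold chainL
  rw [replace_id _ _ _ 'b' (by decide)
    (not_mem_parts 'b' "k".toList "_{".toList "}".toList d hd (by decide) (by decide) (by decide) (by decide))]
  rw [replace_id _ _ _ 's' (by decide)
    (not_mem_parts 's' "k".toList "_{".toList "}".toList d hd (by decide) (by decide) (by decide) (by decide))]
  rw [replace_id _ _ _ 'u' (by decide)
    (not_mem_parts 'u' "k".toList "_{".toList "}".toList d hd (by decide) (by decide) (by decide) (by decide))]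
  rw [replace_id _ _ _ 'x' (by decide)
    (not_mem_parts 'x' "k".toList "_{".toList "}".toList d hd (by decide) (by decide) (by decide) (by decide))]

lemma plot_eq_map_wca (l : List String) :
    (l.map (fun s => PySem.Str.replace (PySem.Str.replace (PySem.Str.replace
        (PySem.Str.replace s "beta" "\\beta") "sigma" "\\sigma") "tau" "\\tau") "xi" "\\xi")).map
      (fun item => String.ofList ('$' :: item.toList ++ ['$'])) = l.map wca := by
  rw [List.map_map]
  apply List.map_congr_left
  intro s _
  simp [Function.comp, wca, chainL, PySem.Str.toList_replace]

lemma bVarMap_sym {v : String} {sym : String} {ex : Bool}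
    (h : bVarMap.get? v = some (sym, ex)) :
    sym = "beta" ∨ sym = "sigma" ∨ sym = "c" ∨ sym = "tau" ∨ sym = "xi" ∨ sym = "k" := by
  unfold bVarMap at h
  simp only [PySem.Dict.get?_mk_cons] at h
  split_ifs at h <;> simp_all [PySem.Dict.get?]

lemma bPdfMap_sym {p : String} {sym : String} (h : bPdfMap.get? p = some sym) :
    sym = "beta" ∨ sym = "sigma" ∨ sym = "c" ∨ sym = "tau" ∨ sym = "xi" ∨ sym = "k" := by
  unfold bPdfMap at h
  simp only [PySem.Dict.get?_mk_cons] at h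
  split_ifs at h <;> simp_all [PySem.Dict.get?]

lemma bLatex_beta : bLatex.getD "beta" "beta" = "\\beta" := by decide
lemma bLatex_sigma : bLatex.getD "sigma" "sigma" = "\\sigma" := by decide
lemma bLatex_c : bLatex.getD "c" "c" = "c" := by decide
lemma bLatex_tau : bLatex.getD "tau" "tau" = "\\tau" := by decide
lemma bLatex_xi : bLatex.getD "xi" "xi" = "\\xi" := by decide
lemma bLatex_k : bLatex.getD "k" "k" = "k" := by decide

lemma bAdd_snd (acc : List String × List String) (sym : String) (ex : Bool) (K : Int)
    (h : acc.2 = acc.1.map wca)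
    (hsym : sym = "beta" ∨ sym = "sigma" ∨ sym = "c" ∨ sym = "tau" ∨ sym = "xi" ∨ sym = "k") :
    (bAdd acc sym ex K).2 = (bAdd acc sym ex K).1.map wca := by
  unfold bAdd
  cases ex with
  | false =>
    simp only [Bool.false_eq_true, if_false, List.map_append, h]
    refine congrArg (acc.1.map wca ++ ·) ?_
    rcases hsym with rfl | rfl | rfl | rfl | rfl | rfl <;> decide
  | true =>
    simp only [if_true, List.map_append, List.map_map, h]
    refine congrArg (acc.1.map wca ++ ·) ?_
    apply List.map_congr_left
    intro i hi
    have h1 : (1 : Int) ≤ i := (PySem.List.mem_pyRange_one.1 hi).1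
    have hd := toChars_digits i h1
    rcases hsym with rfl | rfl | rfl | rfl | rfl | rfl <;>
      simp only [Function.comp_apply, wca, String.toList_ofList, List.append_assoc,
        bLatex_beta, bLatex_sigma, bLatex_c, bLatex_tau, bLatex_xi, bLatex_k]
    · rw [chain_beta _ hd]
    · rw [chain_sigma _ hd]
    · rw [chain_c _ hd]
    · rw [chain_tau _ hd]
    · rw [chain_xi _ hd]
    · rw [chain_k _ hd]

lemma alt_snd (method : String) (options : List (String × String)) (K : Int) :
    (create_str_plot_alt method options K).2 = (create_str_plot_alt method options K).1.map wca := by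
  unfold create_str_plot_alt
  have h0 : (bAdd ([], []) "beta" true K).2 = (bAdd ([], []) "beta" true K).1.map wca :=
    bAdd_snd _ _ _ _ (by simp) (Or.inl rfl)
  by_cases hm : method = "bma"
  · simp only [hm, if_true]
    rcases hv : (PySem.Dict.mk options).get? "VAR" with _ | v <;>
      simp only []
    · rcases hp : (PySem.Dict.mk options).get? "PDF" with _ | p <;> simp only []
      · exact h0
      · rcases hq : bPdfMap.get? p with _ | sym <;> simp only []
        · exact h0
        · rcases ht : (PySem.Dict.mk options).get? "TAU" with _ | tau <;> simp only []
          · exact h0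
          · by_cases htv : tau = "1" ∨ tau = "2"
            · simp only [if_pos htv]; exact bAdd_snd _ _ _ _ h0 (bPdfMap_sym hq)
            · simp only [if_neg htv]; exact h0
    · rcases hw : bVarMap.get? v with _ | ⟨sym, ex⟩ <;> simp only []
      · rcases hp : (PySem.Dict.mk options).get? "PDF" with _ | p <;> simp only []
        · exact h0
        · rcases hq : bPdfMap.get? p with _ | sym <;> simp only []
          · exact h0
          · rcases ht : (PySem.Dict.mk options).get? "TAU" with _ | tau <;> simp only []
            · exact h0
            · by_cases htv : tau = "1" ∨ tau = "2"
              · simp only [if_pos htv]; exact bAdd_snd _ _ _ _ h0 (bPdfMap_sym hq)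
              · simp only [if_neg htv]; exact h0
      · have h1 : (bAdd (bAdd ([], []) "beta" true K) sym ex K).2 =
            (bAdd (bAdd ([], []) "beta" true K) sym ex K).1.map wca :=
          bAdd_snd _ _ _ _ h0 (bVarMap_sym hw)
        rcases hp : (PySem.Dict.mk options).get? "PDF" with _ | p <;> simp only []
        · exact h1
        · rcases hq : bPdfMap.get? p with _ | sym' <;> simp only []
          · exact h1
          · rcases ht : (PySem.Dict.mk options).get? "TAU" with _ | tau <;> simp only []
            · exact h1
            · by_cases htv : tau = "1" ∨ tau = "2"
              · simp only [if_pos htv]; exact bAdd_snd _ _ _ _ h1 (bPdfMap_sym hq)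
              · simp only [if_neg htv]; exact h1
  · simp only [hm, if_false]
    exact h0

lemma a_snd (method : String) (options : List (String × String)) (K : Int) :
    (create_str_plot method options K).2 = (create_str_plot method options K).1.map wca := by
  unfold create_str_plot
  dsimp only
  exact plot_eq_map_wca _

lemma bVarMap_1 : bVarMap.get? "1" = some ("sigma", false) := by decide
lemma bVarMap_2 : bVarMap.get? "2" = some ("sigma", true) := by decide
lemma bVarMap_3 : bVarMap.get? "3" = some ("c", false) := by decide
lemma bVarMap_4 : bVarMap.get? "4" = some ("c", true) := by decide
lemma bVarMap_none {v : String} (h1 : v ≠ "1") (h2 : v ≠ "2") (h3 : v ≠ "3") (h4 : v ≠ "4") :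
    bVarMap.get? v = none := by
  unfold bVarMap
  simp only [PySem.Dict.get?_mk_cons, beq_iff_eq]
  rw [if_neg (fun h => h1 h.symm), if_neg (fun h => h2 h.symm),
    if_neg (fun h => h3 h.symm), if_neg (fun h => h4 h.symm)]
  rfl

lemma bPdfMap_gn : bPdfMap.get? "gen_normal" = some "tau" := by decide
lemma bPdfMap_gev : bPdfMap.get? "gev" = some "xi" := by decide
lemma bPdfMap_gp : bPdfMap.get? "gpareto" = some "k" := by decide
lemma bPdfMap_none {p : String} (h1 : p ≠ "gen_normal") (h2 : p ≠ "gev") (h3 : p ≠ "gpareto") :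
    bPdfMap.get? p = none := by
  unfold bPdfMap
  simp only [PySem.Dict.get?_mk_cons, beq_iff_eq]
  rw [if_neg (fun h => h1 h.symm), if_neg (fun h => h2 h.symm), if_neg (fun h => h3 h.symm)]
  rfl

lemma pdf_part (d : PySem.Dict String String) (sA : List String)
    (accB : List String × List String) (K : Int) (heq : sA = accB.1) (p : String)
    (hp : d.get? "PDF" = some p)
    (hT : (p = "gen_normal" ∨ p = "gev" ∨ p = "gpareto") → ∃ t, d.get? "TAU" = some t) :
    (if d.get? "PDF" = some "gen_normal" ∨ d.get? "PDF" = some "gev" ∨ d.get? "PDF" = some "gpareto" then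
        if d.get? "PDF" = some "gen_normal" then
          if d.get? "TAU" = some "1" then sA ++ ["tau"]
          else if d.get? "TAU" = some "2" then sA ++ (PySem.List.pyRange 1 (K+1)).map
            (fun i => String.ofList ("tau_{".toList ++ PySem.Int.toChars i ++ "}".toList))
          else sA
        else if d.get? "PDF" = some "gev" then
          if d.get? "TAU" = some "1" then sA ++ ["xi"]
          else if d.get? "TAU" = some "2" then sA ++ (PySem.List.pyRange 1 (K+1)).map
            (fun i => String.ofList ("xi_{".toList ++ PySem.Int.toChars i ++ "}".toList))
          else sA
        else
          if d.get? "TAU" = some "1" then sA ++ ["k"]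
          else if d.get? "TAU" = some "2" then sA ++ (PySem.List.pyRange 1 (K+1)).map
            (fun i => String.ofList ("k_{".toList ++ PySem.Int.toChars i ++ "}".toList))
          else sA
      else sA)
    = (match d.get? "PDF" with
       | none => accB
       | some p =>
         match bPdfMap.get? p with
         | none => accB
         | some sym =>
           match d.get? "TAU" with
           | none => accB
           | some tau => if tau = "1" ∨ tau = "2" then bAdd accB sym (tau = "2") K else accB).1 := by
  rw [hp]
  simp only [Option.some.injEq]
  by_cases h1 : p = "gen_normal"
  · subst h1
    obtain ⟨t, ht⟩ := hT (Or.inl rfl)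
    rw [ht]
    simp only [bPdfMap_gn]
    by_cases t1 : t = "1"
    · subst t1; simp [bAdd, heq]
    · by_cases t2 : t = "2"
      · subst t2; simp [bAdd, heq]
      · simp [t1, t2, heq]
  · by_cases h2 : p = "gev"
    · subst h2
      obtain ⟨t, ht⟩ := hT (Or.inr (Or.inl rfl))
      rw [ht]
      simp only [bPdfMap_gev]
      by_cases t1 : t = "1"
      · subst t1; simp [bAdd, heq]
      · by_cases t2 : t = "2"
        · subst t2; simp [bAdd, heq]
        · simp [t1, t2, heq, h1]
    · by_cases h3 : p = "gpareto"
      · subst h3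
        obtain ⟨t, ht⟩ := hT (Or.inr (Or.inr rfl))
        rw [ht]
        simp only [bPdfMap_gp]
        by_cases t1 : t = "1"
        · subst t1; simp [bAdd, heq, h1, h2]
        · by_cases t2 : t = "2"
          · subst t2; simp [bAdd, heq, h1, h2]
          · simp [t1, t2, heq, h1, h2]
      · rw [bPdfMap_none h1 h2 h3]
        simp [h1, h2, h3, heq]

lemma tables_eq (method : String) (options : List (String × String)) (K : Int)
    (hpre : Pre_create_str_plot method options K) :
    (create_str_plot method options K).1 = (create_str_plot_alt method options K).1 := by
  unfold create_str_plot create_str_plot_alt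
  by_cases hm : method = "bma"
  · obtain ⟨hVAR, hPDF, hTAU⟩ := hpre hm
    rw [PySem.Dict.contains_eq_isSome_get?] at hVAR hPDF
    obtain ⟨v, hv⟩ := Option.isSome_iff_exists.1 hVAR
    obtain ⟨p, hp⟩ := Option.isSome_iff_exists.1 hPDF
    have hT : (p = "gen_normal" ∨ p = "gev" ∨ p = "gpareto") →
        ∃ t, (PySem.Dict.mk options).get? "TAU" = some t := by
      intro h
      refine Option.isSome_iff_exists.1 ?_
      rw [← PySem.Dict.contains_eq_isSome_get?]
      apply hTAU
      rcases h with rfl | rfl | rfl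
      · exact Or.inl hp
      · exact Or.inr (Or.inl hp)
      · exact Or.inr (Or.inr hp)
    dsimp only
    rw [if_pos hm, if_pos hm]
    refine pdf_part _ _ _ _ ?_ p hp hT
    rw [hv]
    simp only [Option.some.injEq]
    by_cases h1 : v = "1"
    · subst h1; simp only [bVarMap_1]; simp [bAdd]
    · by_cases h2 : v = "2"
      · subst h2; simp only [bVarMap_2]; simp [h1, bAdd]
      · by_cases h3 : v = "3"
        · subst h3; simp only [bVarMap_3]; simp [h1, h2, bAdd]
        · by_cases h4 : v = "4"
          · subst h4; simp only [bVarMap_4]; simp [h1, h2, h3, bAdd]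
          · rw [bVarMap_none h1 h2 h3 h4]
            simp [h1, h2, h3, h4, bAdd]
  · dsimp only
    rw [if_neg hm, if_neg hm]
    simp [bAdd]

-- ===== VERDICT (by name: the statement is the Claim_ definition above) =====
theorem create_str_plot_spec : Claim_equal_create_str_plot := by
  intro method options K _ hpre
  unfold Spec_create_str_plot
  have h1 := tables_eq method options K hpre
  have h2 := a_snd method options K
  have h3 := alt_snd method options K
  exact Prod.ext_iff.2 ⟨h1, by rw [h2, h3, h1]⟩
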